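-- pv_equiv track=rewrite | github.com/Darkos32/TEP | Lista3/slump.py | slurpy
-- ===== SOURCE A (Python) =====
-- def slump(string):
--     if len(string) <3:
--         return False
--     if string[0] !="D" and string[0]!="E":
--         return False
--     if string[1]!="F":
--         return False
--     index = 1
--     while  index < len(string) and string[index]=="F":
--         index+=1
--     resto = string[index if index < len(string) else len(string) - 1:]
--     if len(resto) == 1:
--         if resto[0]!="G":
--             return False
--     else:
--         if(not slump(resto)):
--             return False
--     return True
--
-- def slimp(string):
--     if len(string)<2:
--         return False
--     if string[0]!="A":
--         return False
--     if len(string) ==2: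
--         if string[1]=="H":
--             return True
--         else:
--             return False
--     else:
--         if string[-1] != "C":
--             return False
--         else:
--             if string[1]=="B" and slimp(string[2:len(string)-1]):
--                 return True
--             elif slump(string[1:len(string) -1]):
--                 return True
--             else:
--                 return False
--
-- def slurpy(string):
--     if len(string)<5:
--         return False
--     for tam in range(2,len(string)):
--         sub1 = string[0:tam]
--         sub2 = string[tam:]
--         if slimp(sub1) and slump(sub2):
--             return True
--     return False
-- ===== SOURCE B (Python) =====
-- def _slump(s, i, j):
--     # s[i:j] matches ((D|E)F+)+ G via one linear scan (no recursion, no copies)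
--     k = i
--     groups = 0
--     while k + 1 < j and (s[k] == "D" or s[k] == "E") and s[k + 1] == "F":
--         k += 2
--         while k < j and s[k] == "F":
--             k += 1
--         groups += 1
--     return groups > 0 and k == j - 1 and s[k] == "G"
--
--
-- def _slimp(s, i, j):
--     # s[i:j] matches (AB)^k (AH | A<slump>C) C^k : count leading "AB" pairs,
--     # then check the core and the k trailing C's in place
--     k = 0
--     while i + 2 * k + 1 < j and s[i + 2 * k] == "A" and s[i + 2 * k + 1] == "B":
--         k += 1
--     p = i + 2 * k
--     if p + 1 < j and s[p] == "A" and s[p + 1] == "H":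
--         return j - (p + 2) == k and all(s[x] == "C" for x in range(p + 2, j))
--     if p + 1 < j and s[p] == "A":
--         m = j - (k + 1)
--         return m >= p + 1 and all(s[x] == "C" for x in range(m, j)) and _slump(s, p + 1, m)
--     return False
--
--
-- def slurpy(string):
--     n = len(string)
--     if n < 5:
--         return False
--     return any(_slimp(string, 0, t) and _slump(string, t, n) for t in range(2, n))
-- ===== Notes on version B (the rewrite author's own statement) =====
-- stated objective: faster
-- what changed: A decides each split by recursive slump/slimp checks that slice out fresh substrings at every recursion level; B never copies: it scans character positions with an iterative regular-automaton pass for slump and counts the leading A-B pairs and trailing C letters in place for slimp, giving an O(n^2) check instead of A's O(n^3).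
import Mathlib
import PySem

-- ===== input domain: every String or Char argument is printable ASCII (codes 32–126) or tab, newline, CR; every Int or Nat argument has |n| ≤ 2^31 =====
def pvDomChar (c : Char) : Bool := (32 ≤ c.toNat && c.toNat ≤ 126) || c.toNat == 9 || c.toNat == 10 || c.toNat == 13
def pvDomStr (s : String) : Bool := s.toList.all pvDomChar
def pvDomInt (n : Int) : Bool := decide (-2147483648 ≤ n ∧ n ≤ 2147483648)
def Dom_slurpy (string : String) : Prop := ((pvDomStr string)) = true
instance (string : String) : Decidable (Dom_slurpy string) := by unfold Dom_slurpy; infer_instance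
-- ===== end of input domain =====

-- B re-implements slurpy with linear scans over character positions (no slicing, no deep
-- recursion): an O(n^2) check in place of A's recursive, slice-copying O(n^3) one.

-- ===== PORT A =====
-- while loop of slump: advance index over 'F's
def slumpWhile (l : List Char) (index : Nat) : Nat :=
  if h : index < l.length ∧ l[index]! = 'F' then slumpWhile l (index + 1) else index
termination_by l.length - index
decreasing_by omega

theorem slumpWhile_ge (l : List Char) (index : Nat) : index ≤ slumpWhile l index := by
  fun_induction slumpWhile l index with
  | case1 _ _ ih => omega
  | case2 => omega

-- resto = string[index if index < len(string) else len(string) - 1:]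
def restoOf (l : List Char) : List Char :=
  let index := slumpWhile l 1
  l.drop (if index < l.length then index else l.length - 1)

theorem restoOf_length_lt (l : List Char) (h : 2 ≤ l.length) : (restoOf l).length < l.length := by
  unfold restoOf
  have := slumpWhile_ge l 1
  simp only [List.length_drop]
  split <;> omega

def slumpA (l : List Char) : Bool :=
  if l.length < 3 then false
  else if l[0]! ≠ 'D' ∧ l[0]! ≠ 'E' then false
  else if l[1]! ≠ 'F' then false
  else
    let resto := restoOf l
    if resto.length = 1 then
      if resto[0]! ≠ 'G' then false else true
    else
      if ¬ slumpA resto then false else true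
termination_by l.length
decreasing_by exact restoOf_length_lt _ (by omega)

-- slices s[2:len-1] and s[1:len-1] written as drop/take: exact by PySem.List.slice_natCast (bounds are nonnegative)
def slimpA (l : List Char) : Bool :=
  if l.length < 2 then false
  else if l[0]! ≠ 'A' then false
  else if l.length = 2 then
    if l[1]! = 'H' then true else false
  else if l[l.length - 1]! ≠ 'C' then false
  else if l[1]! = 'B' ∧ slimpA ((l.drop 2).take (l.length - 1 - 2)) then true
  else if slumpA ((l.drop 1).take (l.length - 1 - 1)) then true
  else false
termination_by l.length
decreasing_by simp; omega

def slurpyA (l : List Char) : Bool :=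
  if l.length < 5 then false
  else
    (PySem.List.pyRange 2 (l.length : Int) 1).any fun tam =>
      slimpA (PySem.List.slice l (some 0) (some tam)) && slumpA (PySem.List.slice l (some tam) none)

def slurpy (string : String) : Bool := slurpyA string.toList

-- ===== PORT B =====
-- inner while of _slump: skip the run of 'F's
def fRun (s : List Char) (j k : Nat) : Nat :=
  if h : k < j ∧ s[k]! = 'F' then fRun s j (k + 1) else k
termination_by j - k
decreasing_by omega

theorem fRun_ge (s : List Char) (j k : Nat) : k ≤ fRun s j k := by
  fun_induction fRun s j k with
  | case1 _ _ ih => omega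
  | case2 => omega

-- outer while of _slump
def slumpGo (s : List Char) (j k groups : Nat) : Bool :=
  if h : k + 1 < j ∧ (s[k]! = 'D' ∨ s[k]! = 'E') ∧ s[k + 1]! = 'F' then
    slumpGo s j (fRun s j (k + 2)) (groups + 1)
  else
    decide (0 < groups ∧ k = j - 1) && (s[k]! == 'G')
termination_by j - k
decreasing_by have := fRun_ge s j (k + 2); omega

-- k-counting while of _slimp
def abCount (s : List Char) (i j k : Nat) : Nat :=
  if h : i + 2 * k + 1 < j ∧ s[i + 2 * k]! = 'A' ∧ s[i + 2 * k + 1]! = 'B' then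
    abCount s i j (k + 1)
  else k
termination_by j - (i + 2 * k)
decreasing_by omega

def slimpIdx (s : List Char) (i j : Nat) : Bool :=
  let k := abCount s i j 0
  let p := i + 2 * k
  if p + 1 < j ∧ s[p]! = 'A' ∧ s[p + 1]! = 'H' then
    decide (j - (p + 2) = k) && (List.range' (p + 2) (j - (p + 2))).all (fun x => s[x]! == 'C')
  else if p + 1 < j ∧ s[p]! = 'A' then
    let m := j - (k + 1)
    decide (p + 1 ≤ m) && ((List.range' m (j - m)).all (fun x => s[x]! == 'C') && slumpGo s m (p + 1) 0)
  else false

def slurpyB (s : List Char) : Bool :=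
  let n := s.length
  if n < 5 then false
  else (List.range' 2 (n - 2)).any fun t => slimpIdx s 0 t && slumpGo s n t 0

def slurpy_alt (string : String) : Bool := slurpyB string.toList

-- ===== PRECONDITION & SPEC =====
def Spec_slurpy (string : String) (out : Bool) : Prop := out = slurpy_alt string
instance (string : String) (out : Bool) : Decidable (Spec_slurpy string out) := by unfold Spec_slurpy; infer_instance

-- ===== CLAIM (what is proved, stated in full; the proofs are below) =====
def Claim_equal_slurpy : Prop := ∀ (string : String), Dom_slurpy string → Spec_slurpy string (slurpy string)

-- ===== LEMMAS AND PROOFS =====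
theorem fRun_le (s : List Char) (j k : Nat) (h : k ≤ j) : fRun s j k ≤ j := by
  fun_induction fRun s j k with
  | case1 _ hc ih => exact ih (by omega)
  | case2 => omega




-- ===== proof development =====
theorem sub_length (s : List Char) (i j : Nat) (h1 : i ≤ j) (h2 : j ≤ s.length) :
    ((s.drop i).take (j - i)).length = j - i := by simp; omega

theorem sub_get (s : List Char) (i j m : Nat) (h : i + m < j) (h2 : j ≤ s.length) :
    ((s.drop i).take (j - i))[m]! = s[i + m]! := by
  have hm : m < ((s.drop i).take (j - i)).length := by simp; omega
  rw [getElem!_pos ((s.drop i).take (j - i)) m hm,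
      getElem!_pos s (i + m) (show i + m < s.length by omega)]
  rw [List.getElem_take, List.getElem_drop]

theorem sub_drop (s : List Char) (i j d : Nat) :
    ((s.drop i).take (j - i)).drop d = (s.drop (i + d)).take (j - i - d) := by
  rw [List.drop_take, List.drop_drop]

-- the two F-skipping whiles coincide
theorem whileF_eq (s : List Char) (i j : Nat) (h2 : j ≤ s.length) :
    ∀ k, i ≤ k → k ≤ j → slumpWhile ((s.drop i).take (j - i)) (k - i) = fRun s j k - i := by
  intro k
  fun_induction fRun s j k with
  | case1 k hc ih =>
    intro hik hkj
    rw [slumpWhile]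
    rw [dif_pos (show k - i < ((s.drop i).take (j - i)).length ∧ ((s.drop i).take (j - i))[k - i]! = 'F' by
      refine ⟨by rw [sub_length s i j (by omega) h2]; omega, ?_⟩
      have := sub_get s i j (k - i) (by omega) h2
      rw [show i + (k - i) = k by omega] at this
      rw [this]; exact hc.2)]
    rw [show k - i + 1 = (k + 1) - i by omega]
    exact ih (by omega) (by omega)
  | case2 k hc =>
    intro hik hkj
    rw [slumpWhile]
    rw [dif_neg]
    intro ⟨ha, hb⟩
    rw [sub_length s i j (by omega) h2] at ha
    have := sub_get s i j (k - i) (by omega) h2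
    rw [show i + (k - i) = k by omega] at this
    rw [this] at hb
    exact hc ⟨by omega, hb⟩

theorem fRun_all_F (s : List Char) (j k : Nat) :
    ∀ x, k ≤ x → x < fRun s j k → s[x]! = 'F' := by
  fun_induction fRun s j k with
  | case1 k hc ih =>
    intro x hx1 hx2
    rcases Nat.eq_or_lt_of_le hx1 with rfl | h
    · exact hc.2
    · exact ih x (by omega) hx2
  | case2 k hc => intro x h1 h2; omega

theorem slumpGo_groups_pos (s : List Char) (j : Nat) :
    ∀ k g g', 0 < g → 0 < g' → slumpGo s j k g = slumpGo s j k g' := by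
  intro k g
  fun_induction slumpGo s j k g with
  | case1 k g hc ih =>
    intro g' hg hg'
    conv_rhs => rw [slumpGo]
    rw [dif_pos hc]
    exact ih (g' + 1) (by omega) (by omega)
  | case2 k g hc =>
    intro g' hg hg'
    conv_rhs => rw [slumpGo]
    rw [dif_neg hc]
    simp [hg, hg']

theorem slumpGo_one_eq_zero (s : List Char) (j k : Nat) (h : k + 1 < j) :
    slumpGo s j k 1 = slumpGo s j k 0 := by
  conv_lhs => rw [slumpGo]
  conv_rhs => rw [slumpGo]
  by_cases hc : k + 1 < j ∧ (s[k]! = 'D' ∨ s[k]! = 'E') ∧ s[k + 1]! = 'F'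
  · rw [dif_pos hc, dif_pos hc]
    exact slumpGo_groups_pos s j _ 2 1 (by omega) (by omega)
  · rw [dif_neg hc, dif_neg hc]
    have hne : ¬ (k = j - 1) := by omega
    simp [hne]

-- main slump lemma: B's scan from i equals A's recursion on the segment [i, j)
theorem slump_main (s : List Char) (j : Nat) (h2 : j ≤ s.length) :
    ∀ d i, i ≤ j → j - i ≤ d → slumpGo s j i 0 = slumpA ((s.drop i).take (j - i)) := by
  intro d
  induction d with
  | zero =>
    intro i hij hd
    have : i = j := by omega
    subst this
    rw [slumpGo, dif_neg (by omega), slumpA, if_pos (by rw [sub_length s i i (by omega) h2]; omega)]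
    simp
  | succ d ih =>
    intro i hij hd
    by_cases hc : i + 1 < j ∧ (s[i]! = 'D' ∨ s[i]! = 'E') ∧ s[i + 1]! = 'F'
    · rw [slumpGo, dif_pos hc]
      by_cases hn : j - i < 3
      · -- j = i + 2 : A fails the length test, B's scan runs off the end
        have hfr : fRun s j (i + 2) = j := by rw [fRun, dif_neg (by omega)]; omega
        rw [hfr, slumpGo, dif_neg (by omega), slumpA, if_pos (by rw [sub_length s i j (by omega) h2]; omega)]
        simp; omega
      · have hA0 : ¬ (((s.drop i).take (j - i)).length < 3) := by
          rw [sub_length s i j (by omega) h2]; omega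
        have hg0 : ((s.drop i).take (j - i))[0]! = s[i]! := by
          have := sub_get s i j 0 (by omega) h2; simpa using this
        have hg1 : ((s.drop i).take (j - i))[1]! = s[i + 1]! := sub_get s i j 1 (by omega) h2
        rw [slumpA, if_neg hA0, if_neg (by rw [hg0]; rcases hc.2.1 with h | h <;> simp [h]),
            if_neg (by rw [hg1]; simp [hc.2.2])]
        have hidx : slumpWhile ((s.drop i).take (j - i)) 1 = fRun s j (i + 2) - i := by
          have h1 : slumpWhile ((s.drop i).take (j - i)) ((i + 1) - i) = fRun s j (i + 1) - i :=
            whileF_eq s i j h2 (i + 1) (by omega) (by omega)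
          rw [show (i + 1) - i = 1 by omega] at h1
          rw [h1, fRun, dif_pos ⟨by omega, hc.2.2⟩]
        have hge : i + 2 ≤ fRun s j (i + 2) := fRun_ge s j (i + 2)
        have hle : fRun s j (i + 2) ≤ j := fRun_le s j (i + 2) (by omega)
        have hFall : ∀ x, i + 2 ≤ x → x < fRun s j (i + 2) → s[x]! = 'F' := fRun_all_F s j (i + 2)
        generalize hgen : fRun s j (i + 2) = i' at hidx hge hle hFall ⊢
        simp only [restoOf, hidx, sub_length s i j (by omega) h2]
        by_cases hlt : i' < j
        · rw [if_pos (show i' - i < j - i by omega), sub_drop,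
              show i + (i' - i) = i' by omega, show j - i - (i' - i) = j - i' by omega]
          have hrl : ((s.drop i').take (j - i')).length = j - i' := sub_length s i' j (by omega) h2
          by_cases hone : j - i' = 1
          · rw [if_pos (by rw [hrl]; omega)]
            have hr0 : ((s.drop i').take (j - i'))[0]! = s[i']! := by
              have := sub_get s i' j 0 (by omega) h2; simpa using this
            rw [slumpGo, dif_neg (by omega), hr0, show i' = j - 1 by omega]
            simp only [show (0 < 1 ∧ j - 1 = j - 1) by omega, decide_true, Bool.true_and]
            by_cases hG : s[j - 1]! = 'G'
            · rw [if_neg (by simp [hG])]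
              simpa using hG
            · rw [if_pos hG]
              simpa using hG
          · rw [if_neg (by rw [hrl]; omega)]
            rw [slumpGo_one_eq_zero s j i' (by omega), ih i' (by omega) (by omega)]
            by_cases hsl : slumpA ((s.drop i').take (j - i')) <;> simp [hsl]
        · have hij' : i' = j := by omega
          rw [if_neg (show ¬ (i' - i < j - i) by omega), sub_drop, show i + (j - i - 1) = j - 1 by omega,
              show j - i - (j - i - 1) = 1 by omega]
          have hlen : ((s.drop (j - 1)).take 1).length = 1 := by
            have := sub_length s (j - 1) j (by omega) h2
            rw [show j - (j - 1) = 1 by omega] at this; exact this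
          rw [if_pos hlen]
          have hr0 : ((s.drop (j - 1)).take 1)[0]! = s[j - 1]! := by
            have := sub_get s (j - 1) j 0 (by omega) h2
            rw [show j - (j - 1) = 1 by omega] at this
            simpa using this
          have hF : s[j - 1]! = 'F' := hFall (j - 1) (by omega) (by omega)
          rw [hr0, hF, if_pos (by decide), hij', slumpGo, dif_neg (by omega)]
          simp; omega
    · rw [slumpGo, dif_neg hc]
      rw [slumpA]
      by_cases hn : j - i < 3
      · rw [if_pos (by rw [sub_length s i j (by omega) h2]; omega)]; simp
      · have hg0 : ((s.drop i).take (j - i))[0]! = s[i]! := by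
          have := sub_get s i j 0 (by omega) h2; simpa using this
        rw [if_neg (by rw [sub_length s i j (by omega) h2]; omega)]
        by_cases hDE : s[i]! = 'D' ∨ s[i]! = 'E'
        · have hg1 : ((s.drop i).take (j - i))[1]! = s[i + 1]! := sub_get s i j 1 (by omega) h2
          have hF : ¬ s[i + 1]! = 'F' := fun h => hc ⟨by omega, hDE, h⟩
          rw [if_neg (by rw [hg0]; rcases hDE with h | h <;> simp [h]), if_pos (by rw [hg1]; exact hF)]
          simp
        · rw [if_pos (by rw [hg0]; push_neg at hDE; exact hDE)]
          simp

-- abCount facts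
theorem abCount_shift (s : List Char) (i j : Nat) :
    ∀ k, abCount s i j (k + 1) = abCount s (i + 2) j k + 1 := by
  intro k
  fun_induction abCount s (i + 2) j k with
  | case1 k hc ih =>
    rw [abCount, dif_pos (show i + 2 * (k + 1) + 1 < j ∧ s[i + 2 * (k + 1)]! = 'A' ∧ s[i + 2 * (k + 1) + 1]! = 'B' by
      refine ⟨by omega, ?_, ?_⟩
      · rw [show i + 2 * (k + 1) = i + 2 + 2 * k by ring]; exact hc.2.1
      · rw [show i + 2 * (k + 1) + 1 = i + 2 + 2 * k + 1 by ring]; exact hc.2.2)]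
    exact ih
  | case2 k hc =>
    rw [abCount, dif_neg (by
      rintro ⟨ha, hb, hcc⟩
      rw [show i + 2 * (k + 1) = i + 2 + 2 * k by ring] at hb
      rw [show i + 2 * (k + 1) + 1 = i + 2 + 2 * k + 1 by ring] at hcc
      exact hc ⟨by omega, hb, hcc⟩)]

theorem abCount_stop (s : List Char) (i j k : Nat) :
    ¬ (i + 2 * abCount s i j k + 1 < j ∧ s[i + 2 * abCount s i j k]! = 'A'
        ∧ s[i + 2 * abCount s i j k + 1]! = 'B') := by
  fun_induction abCount s i j k with
  | case1 k hc ih => exact ih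
  | case2 k hc => exact hc

-- extending the bound from j-1 to j adds at most the boundary pair
theorem abCount_bound (s : List Char) (a j : Nat) :
    ∀ k, abCount s a j k =
      (if a + 2 * abCount s a (j - 1) k + 1 < j ∧ s[a + 2 * abCount s a (j - 1) k]! = 'A'
          ∧ s[a + 2 * abCount s a (j - 1) k + 1]! = 'B'
        then abCount s a (j - 1) k + 1 else abCount s a (j - 1) k) := by
  intro k
  fun_induction abCount s a (j - 1) k with
  | case1 k hc ih =>
    rw [show abCount s a j k = abCount s a j (k + 1) by
      conv_lhs => rw [abCount]
      rw [dif_pos ⟨by omega, hc.2⟩]]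
    exact ih
  | case2 k hc =>
    by_cases hcj : a + 2 * k + 1 < j ∧ s[a + 2 * k]! = 'A' ∧ s[a + 2 * k + 1]! = 'B'
    · rw [if_pos hcj]
      have hb : ¬ (a + 2 * k + 1 < j - 1) := fun h => hc ⟨h, hcj.2⟩
      rw [abCount, dif_pos hcj, abCount, dif_neg (by rintro ⟨h, -⟩; omega)]
    · rw [if_neg hcj, abCount, dif_neg hcj]

-- splitting the trailing-C check at the last position
theorem allC_split (s : List Char) (m j : Nat) (h : m ≤ j - 1) (hj : 1 ≤ j) :
    (List.range' m (j - m)).all (fun x => s[x]! == 'C')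
      = ((List.range' m (j - 1 - m)).all (fun x => s[x]! == 'C') && (s[j - 1]! == 'C')) := by
  rw [show j - m = (j - 1 - m) + 1 by omega, List.range'_concat]
  simp only [one_mul, show m + (j - 1 - m) = j - 1 by omega, List.all_append]
  simp

-- peeling one leading "AB" / trailing 'C' off B's slimp check
theorem slimpIdx_peel (s : List Char) (i j : Nat)
    (h1 : s[i]! = 'A') (hB : s[i + 1]! = 'B') (h3 : i + 3 ≤ j) :
    slimpIdx s i j = ((s[j - 1]! == 'C') && slimpIdx s (i + 2) (j - 1)) := by
  have hstop2 := abCount_stop s (i + 2) (j - 1) 0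
  have hbound := abCount_bound s (i + 2) j 0
  have hshift : abCount s i j 0 = abCount s (i + 2) j 0 + 1 := by
    rw [abCount, dif_pos (show i + 2 * 0 + 1 < j ∧ s[i + 2 * 0]! = 'A' ∧ s[i + 2 * 0 + 1]! = 'B' by
      refine ⟨by omega, by simpa using h1, by simpa using hB⟩)]
    exact abCount_shift s i j 0
  generalize hk2 : abCount s (i + 2) (j - 1) 0 = k2 at hstop2 hbound
  by_cases hcs : i + 2 + 2 * k2 + 1 < j ∧ s[i + 2 + 2 * k2]! = 'A' ∧ s[i + 2 + 2 * k2 + 1]! = 'B'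
  · -- the boundary pair: positions j-2, j-1 hold "AB"; both sides are false
    have hge : ¬ (i + 2 + 2 * k2 + 1 < j - 1) := fun h => hstop2 ⟨h, hcs.2⟩
    have hp2 : i + 2 + 2 * k2 + 1 = j - 1 := by omega
    have hk1 : abCount s i j 0 = k2 + 2 := by rw [hshift, hbound, if_pos hcs]
    have hCj : s[j - 1]! = 'B' := by rw [← hp2]; exact hcs.2.2
    simp only [slimpIdx, hk1, hCj]
    rw [if_neg (by rintro ⟨h, -⟩; omega), if_neg (by rintro ⟨h, -⟩; omega)]
    simp
  · have hk1 : abCount s i j 0 = k2 + 1 := by rw [hshift, hbound, if_neg hcs]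
    simp only [slimpIdx, hk1, hk2]
    rw [show i + 2 * (k2 + 1) = i + 2 + 2 * k2 by ring]
    by_cases hc1 : i + 2 + 2 * k2 + 1 < j ∧ s[i + 2 + 2 * k2]! = 'A' ∧ s[i + 2 + 2 * k2 + 1]! = 'H'
    · rw [if_pos hc1]
      by_cases hin : i + 2 + 2 * k2 + 1 < j - 1
      · rw [if_pos ⟨hin, hc1.2⟩]
        rw [allC_split s (i + 2 + 2 * k2 + 2) j (by omega) (by omega)]
        have he : (j - (i + 2 + 2 * k2 + 2) = k2 + 1) = (j - 1 - (i + 2 + 2 * k2 + 2) = k2) := by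
          apply propext; omega
        simp only [he]
        simp [Bool.and_assoc, Bool.and_comm, Bool.and_left_comm]
      · -- core "AH" flush against the right end: both sides false
        have hp : i + 2 + 2 * k2 + 1 = j - 1 := by omega
        have hCj : s[j - 1]! = 'H' := by rw [← hp]; exact hc1.2.2
        rw [if_neg (by rintro ⟨h, -⟩; omega)]
        have : (j - (i + 2 + 2 * k2 + 2) = k2 + 1) = False := by
          apply propext; simp; omega
        simp only [this, hCj]
        simp
    · rw [if_neg hc1]
      by_cases hc2 : i + 2 + 2 * k2 + 1 < j ∧ s[i + 2 + 2 * k2]! = 'A'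
      · rw [if_pos hc2]
        by_cases hin : i + 2 + 2 * k2 + 1 < j - 1
        · have hnH : ¬ s[i + 2 + 2 * k2 + 1]! = 'H' := fun h => hc1 ⟨hc2.1, hc2.2, h⟩
          rw [if_neg (by rintro ⟨-, -, h⟩; exact hnH h), if_pos ⟨hin, hc2.2⟩]
          have hm : j - 1 - (k2 + 1) = j - (k2 + 1 + 1) := by omega
          simp only [hm]
          rw [allC_split s (j - (k2 + 1 + 1)) j (by omega) (by omega)]
          simp [Bool.and_assoc, Bool.and_comm, Bool.and_left_comm]
        · -- core flush against the right end: left guard p+1 ≤ m fails, inner arm cannot fire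
          rw [if_neg (by rintro ⟨h, -⟩; omega), if_neg (by rintro ⟨h, -⟩; omega)]
          have : (i + 2 + 2 * k2 + 1 ≤ j - (k2 + 1 + 1)) = False := by
            apply propext; simp; omega
          simp only [this]
          simp
      · rw [if_neg hc2,
            if_neg (fun h => hc2 ⟨Nat.lt_of_lt_of_le h.1 (Nat.sub_le j 1), h.2.1⟩),
            if_neg (fun h => hc2 ⟨Nat.lt_of_lt_of_le h.1 (Nat.sub_le j 1), h.2⟩)]
        simp

-- a slump segment never starts with anything but 'D'/'E'
theorem slumpA_head_false (l : List Char) (h1 : l[0]! ≠ 'D') (h2 : l[0]! ≠ 'E') :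
    slumpA l = false := by
  rw [slumpA]
  by_cases hl : l.length < 3
  · rw [if_pos hl]
  · rw [if_neg hl, if_pos ⟨h1, h2⟩]

theorem beq_decide_char (a b : Char) : (a == b) = decide (a = b) := rfl

-- main slimp lemma: B's index check equals A's recursion on the segment [i, j)
theorem slimp_main (s : List Char) :
    ∀ d i j, i ≤ j → j ≤ s.length → j - i ≤ d →
      slimpIdx s i j = slimpA ((s.drop i).take (j - i)) := by
  intro d
  induction d with
  | zero =>
    intro i j hij hjs hd
    have hk0 : abCount s i j 0 = 0 := by rw [abCount, dif_neg (by rintro ⟨h, -⟩; omega)]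
    simp only [slimpIdx, hk0, Nat.mul_zero, Nat.add_zero, Nat.zero_add]
    rw [if_neg (by rintro ⟨h, -⟩; omega), if_neg (by rintro ⟨h, -⟩; omega),
        slimpA, if_pos (by rw [sub_length s i j hij hjs]; omega)]
  | succ d ih =>
    intro i j hij hjs hd
    by_cases hn2 : j - i < 2
    · have hk0 : abCount s i j 0 = 0 := by rw [abCount, dif_neg (by rintro ⟨h, -⟩; omega)]
      simp only [slimpIdx, hk0, Nat.mul_zero, Nat.add_zero, Nat.zero_add]
      rw [if_neg (by rintro ⟨h, -⟩; omega), if_neg (by rintro ⟨h, -⟩; omega),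
          slimpA, if_pos (by rw [sub_length s i j hij hjs]; omega)]
    · have hg0 : ((s.drop i).take (j - i))[0]! = s[i]! := by
        have := sub_get s i j 0 (by omega) hjs; simpa using this
      have hg1 : ((s.drop i).take (j - i))[1]! = s[i + 1]! := sub_get s i j 1 (by omega) hjs
      by_cases hA : s[i]! = 'A'
      case neg =>
        have hk0 : abCount s i j 0 = 0 := by
          rw [abCount, dif_neg (by rintro ⟨-, h, -⟩; exact hA (by simpa using h))]
        simp only [slimpIdx, hk0, Nat.mul_zero, Nat.add_zero, Nat.zero_add]
        rw [if_neg (by rintro ⟨-, h, -⟩; exact hA h), if_neg (by rintro ⟨-, h⟩; exact hA h),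
            slimpA, if_neg (by rw [sub_length s i j (by omega) hjs]; omega),
            if_pos (by rw [hg0]; exact hA)]
      case pos =>
      by_cases hB : s[i + 1]! = 'B'
      case pos =>
        by_cases hn3 : j - i < 3
        · -- segment is exactly "AB": both sides false
          have hk1 : abCount s i j 0 = 1 := by
            rw [abCount, dif_pos (show i + 2 * 0 + 1 < j ∧ s[i + 2 * 0]! = 'A' ∧ s[i + 2 * 0 + 1]! = 'B' from
                  ⟨by omega, by simpa using hA, by simpa using hB⟩),
                abCount, dif_neg (by rintro ⟨h, -⟩; omega)]
          simp only [slimpIdx, hk1]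
          rw [if_neg (by rintro ⟨h, -⟩; omega), if_neg (by rintro ⟨h, -⟩; omega),
              slimpA, if_neg (by rw [sub_length s i j (by omega) hjs]; omega),
              if_neg (by rw [hg0, hA]; simp), if_pos (by rw [sub_length s i j (by omega) hjs]; omega),
              hg1, if_neg (by rw [hB]; simp)]
        · -- peel one "AB" + trailing 'C' layer on both sides
          have hgl : ((s.drop i).take (j - i))[j - i - 1]! = s[j - 1]! := by
            have := sub_get s i j (j - i - 1) (by omega) hjs
            rw [show i + (j - i - 1) = j - 1 by omega] at this
            exact this
          have hinner : (((s.drop i).take (j - i)).drop 2).take (j - i - 1 - 2)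
              = (s.drop (i + 2)).take (j - 1 - (i + 2)) := by
            rw [sub_drop, List.take_take,
                show min (j - i - 1 - 2) (j - i - 2) = j - 1 - (i + 2) by omega]
          have hmid : (((s.drop i).take (j - i)).drop 1).take (j - i - 1 - 1)
              = (s.drop (i + 1)).take (j - 1 - (i + 1)) := by
            rw [sub_drop, List.take_take,
                show min (j - i - 1 - 1) (j - i - 1) = j - 1 - (i + 1) by omega]
          have hslump : slumpA ((s.drop (i + 1)).take (j - 1 - (i + 1))) = false := by
            apply slumpA_head_false
            · have h0 : ((s.drop (i + 1)).take (j - 1 - (i + 1)))[0]! = s[i + 1]! := by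
                have := sub_get s (i + 1) (j - 1) 0 (by omega) (by omega); simpa using this
              rw [h0, hB]; simp
            · have h0 : ((s.drop (i + 1)).take (j - 1 - (i + 1)))[0]! = s[i + 1]! := by
                have := sub_get s (i + 1) (j - 1) 0 (by omega) (by omega); simpa using this
              rw [h0, hB]; simp
          rw [slimpA, if_neg (by rw [sub_length s i j (by omega) hjs]; omega),
              if_neg (by rw [hg0, hA]; simp), if_neg (by rw [sub_length s i j (by omega) hjs]; omega),
              sub_length s i j (by omega) hjs, hgl, hg1, hinner, hmid, hslump]
          rw [slimpIdx_peel s i j hA hB (by omega),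
              ih (i + 2) (j - 1) (by omega) (by omega) (by omega)]
          by_cases hC : s[j - 1]! = 'C' <;>
            by_cases hX : slimpA ((s.drop (i + 2)).take (j - 1 - (i + 2))) = true <;>
            simp [hC, hX, hB, beq_decide_char]
      case neg =>
        have hk0 : abCount s i j 0 = 0 := by
          rw [abCount, dif_neg (by rintro ⟨-, -, h⟩; exact hB (by simpa using h))]
        by_cases hH : s[i + 1]! = 'H'
        · by_cases hn3 : j - i < 3
          · -- segment "AH": both sides true
            have hL : slimpIdx s i j = true := by
              simp only [slimpIdx, hk0, Nat.mul_zero, Nat.add_zero, Nat.zero_add]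
              rw [if_pos (show i + 1 < j ∧ s[i]! = 'A' ∧ s[i + 1]! = 'H' from ⟨by omega, hA, hH⟩)]
              simp [show j - (i + 2) = 0 by omega]
            rw [hL, slimpA, if_neg (by rw [sub_length s i j (by omega) hjs]; omega),
                if_neg (by rw [hg0, hA]; simp), if_pos (by rw [sub_length s i j (by omega) hjs]; omega),
                hg1, if_pos hH]
          · -- "AH" core with extra characters: both sides false
            have hL : slimpIdx s i j = false := by
              simp only [slimpIdx, hk0, Nat.mul_zero, Nat.add_zero, Nat.zero_add]
              rw [if_pos (show i + 1 < j ∧ s[i]! = 'A' ∧ s[i + 1]! = 'H' from ⟨by omega, hA, hH⟩)]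
              simp [show ¬ (j - (i + 2) = 0) from by omega]
            have hmid : (((s.drop i).take (j - i)).drop 1).take (j - i - 1 - 1)
                = (s.drop (i + 1)).take (j - 1 - (i + 1)) := by
              rw [sub_drop, List.take_take,
                  show min (j - i - 1 - 1) (j - i - 1) = j - 1 - (i + 1) by omega]
            have hgl : ((s.drop i).take (j - i))[j - i - 1]! = s[j - 1]! := by
              have := sub_get s i j (j - i - 1) (by omega) hjs
              rw [show i + (j - i - 1) = j - 1 by omega] at this
              exact this
            have hsl : slumpA ((s.drop (i + 1)).take (j - 1 - (i + 1))) = false := by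
              apply slumpA_head_false
              · have h0 : ((s.drop (i + 1)).take (j - 1 - (i + 1)))[0]! = s[i + 1]! := by
                  have := sub_get s (i + 1) (j - 1) 0 (by omega) (by omega); simpa using this
                rw [h0, hH]; simp
              · have h0 : ((s.drop (i + 1)).take (j - 1 - (i + 1)))[0]! = s[i + 1]! := by
                  have := sub_get s (i + 1) (j - 1) 0 (by omega) (by omega); simpa using this
                rw [h0, hH]; simp
            rw [hL, slimpA, if_neg (by rw [sub_length s i j (by omega) hjs]; omega),
                if_neg (by rw [hg0, hA]; simp), if_neg (by rw [sub_length s i j (by omega) hjs]; omega),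
                sub_length s i j (by omega) hjs, hgl, hg1, hmid, hsl]
            by_cases hC : s[j - 1]! = 'C' <;> simp [hC, hB] <;>
              (intro h; first
                | exact absurd (by simpa using h) hB
                | exact absurd (by simpa using h) hC)
        · by_cases hn3 : j - i < 3
          · -- length-2 segment whose second character is neither 'B' nor 'H': both false
            have hgo : slumpGo s (j - 1) (i + 1) 0 = false := by
              rw [slumpGo, dif_neg (by rintro ⟨h, -⟩; omega)]
              simp
            have hL : slimpIdx s i j = false := by
              simp only [slimpIdx, hk0, Nat.mul_zero, Nat.add_zero, Nat.zero_add]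
              rw [if_neg (show ¬ (i + 1 < j ∧ s[i]! = 'A' ∧ s[i + 1]! = 'H') from fun h => hH h.2.2),
                  if_pos (show i + 1 < j ∧ s[i]! = 'A' from ⟨by omega, hA⟩), hgo]
              simp
            rw [hL, slimpA, if_neg (by rw [sub_length s i j (by omega) hjs]; omega),
                if_neg (by rw [hg0, hA]; simp), if_pos (by rw [sub_length s i j (by omega) hjs]; omega),
                hg1, if_neg hH]
          · -- core level: A tries the slump branch, B checks the same slump segment
            have hmid : (((s.drop i).take (j - i)).drop 1).take (j - i - 1 - 1)
                = (s.drop (i + 1)).take (j - 1 - (i + 1)) := by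
              rw [sub_drop, List.take_take,
                  show min (j - i - 1 - 1) (j - i - 1) = j - 1 - (i + 1) by omega]
            have hgl : ((s.drop i).take (j - i))[j - i - 1]! = s[j - 1]! := by
              have := sub_get s i j (j - i - 1) (by omega) hjs
              rw [show i + (j - i - 1) = j - 1 by omega] at this
              exact this
            have hgo : slumpGo s (j - 1) (i + 1) 0 = slumpA ((s.drop (i + 1)).take (j - 1 - (i + 1))) :=
              slump_main s (j - 1) (by omega) (j - 1) (i + 1) (by omega) (by omega)
            have hL : slimpIdx s i j
                = ((s[j - 1]! == 'C') && slumpA ((s.drop (i + 1)).take (j - 1 - (i + 1)))) := by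
              simp only [slimpIdx, hk0, Nat.mul_zero, Nat.add_zero, Nat.zero_add]
              rw [if_neg (show ¬ (i + 1 < j ∧ s[i]! = 'A' ∧ s[i + 1]! = 'H') from fun h => hH h.2.2),
                  if_pos (show i + 1 < j ∧ s[i]! = 'A' from ⟨by omega, hA⟩), hgo,
                  show j - (j - 1) = 1 by omega, List.range'_one]
              simp [show i + 1 ≤ j - 1 from by omega]
            rw [hL, slimpA, if_neg (by rw [sub_length s i j (by omega) hjs]; omega),
                if_neg (by rw [hg0, hA]; simp), if_neg (by rw [sub_length s i j (by omega) hjs]; omega),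
                sub_length s i j (by omega) hjs, hgl, hg1, hmid]
            by_cases hC : s[j - 1]! = 'C' <;>
              by_cases hG : slumpA ((s.drop (i + 1)).take (j - 1 - (i + 1))) = true <;>
              simp [hC, hG, hB, beq_decide_char] <;>
              (intro h; first
                | exact absurd (by simpa using h) hB
                | exact absurd (by simpa using h) hC)

-- splitting predicate: A's slice tests equal B's index tests
theorem split_pred_eq (l : List Char) (u : Nat) (hu : u ≤ l.length) :
    (slimpA (PySem.List.slice l (some 0) (some (u : Int)))
      && slumpA (PySem.List.slice l (some (u : Int)) none))
      = (slimpIdx l 0 u && slumpGo l l.length u 0) := by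
  have h1 : PySem.List.slice l (some (0 : Int)) (some (u : Int)) = l.take u := by
    rw [PySem.List.slice_zero_start, PySem.List.slice_to_natCast]
  have h2 : PySem.List.slice l (some (u : Int)) none = l.drop u :=
    PySem.List.slice_from_natCast l u
  have h3 : slimpIdx l 0 u = slimpA (l.take u) := by
    have := slimp_main l u 0 u (by omega) hu le_rfl
    simpa using this
  have h4 : slumpGo l l.length u 0 = slumpA (l.drop u) := by
    have := slump_main l l.length le_rfl l.length u hu (by omega)
    rw [this, List.take_of_length_le (by simp)]
  rw [h1, h2, h3, h4]

theorem slurpyAB (l : List Char) : slurpyA l = slurpyB l := by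
  simp only [slurpyA, slurpyB]
  by_cases h5 : l.length < 5
  · rw [if_pos h5, if_pos h5]
  · rw [if_neg h5, if_neg h5]
    apply Bool.coe_iff_coe.mp
    simp only [List.any_eq_true]
    constructor
    · rintro ⟨t, ht, hp⟩
      rw [PySem.List.mem_pyRange_one] at ht
      refine ⟨t.toNat, ?_, ?_⟩
      · rw [List.mem_range'_1]; omega
      · have ht' : t = ((t.toNat : Nat) : Int) := by omega
        rw [ht'] at hp
        rwa [split_pred_eq l t.toNat (by omega)] at hp
    · rintro ⟨u, hu, hq⟩
      rw [List.mem_range'_1] at hu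
      refine ⟨(u : Int), ?_, ?_⟩
      · rw [PySem.List.mem_pyRange_one]; omega
      · rw [split_pred_eq l u (by omega)]
        exact hq

-- ===== VERDICT (by name: the statement is the Claim_ definition above) =====
theorem slurpy_spec : Claim_equal_slurpy := by
  intro string _
  unfold Spec_slurpy slurpy slurpy_alt
  exact slurpyAB string.toList
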